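-- pv_equiv track=rewrite | github.com/aesdeef/advent-of-code-2021 | python/day10/syntax_scoring.py | score_incomplete
-- ===== SOURCE A (Python) =====
-- class InvalidCharacterError(ValueError):
--     """
--     Inappropriate character
--     """
--
-- def score_incomplete(remaining_open_characters: str) -> int:
--     """
--     Returns the score for the given incomplete line
--     """
--     score = 0
--     for character in remaining_open_characters:
--         score *= 5
--         match character:
--             case "(":
--                 score += 1
--             case "[":
--                 score += 2
--             case "{":
--                 score += 3
--             case "<":
--                 score += 4
--             case _:
--                 raise InvalidCharacterError
--     return score
-- ===== SOURCE B (Python) =====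
-- class InvalidCharacterError(ValueError):
--     """
--     Inappropriate character
--     """
--
-- _OPENERS = "([{<"
--
-- def score_incomplete(remaining_open_characters: str) -> int:
--     """
--     Two staged passes: first translate each character to its digit value
--     via its position in _OPENERS, then evaluate the base-5 number as a
--     weighted sum of value * 5**position over the reversed digit list.
--     """
--     values = []
--     for character in remaining_open_characters:
--         if character not in _OPENERS:
--             raise InvalidCharacterError
--         values.append(_OPENERS.index(character) + 1)
--     return sum(v * 5 ** i for i, v in enumerate(reversed(values)))
-- ===== Notes on version B (the rewrite author's own statement) =====
-- stated objective: alternative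
-- what changed: Replaces A's single Horner running-multiply loop with two staged passes: a translation pass mapping each character to its index-based digit value, then a positional weighted sum of value * 5**i over the reversed digit list.
import Mathlib
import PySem

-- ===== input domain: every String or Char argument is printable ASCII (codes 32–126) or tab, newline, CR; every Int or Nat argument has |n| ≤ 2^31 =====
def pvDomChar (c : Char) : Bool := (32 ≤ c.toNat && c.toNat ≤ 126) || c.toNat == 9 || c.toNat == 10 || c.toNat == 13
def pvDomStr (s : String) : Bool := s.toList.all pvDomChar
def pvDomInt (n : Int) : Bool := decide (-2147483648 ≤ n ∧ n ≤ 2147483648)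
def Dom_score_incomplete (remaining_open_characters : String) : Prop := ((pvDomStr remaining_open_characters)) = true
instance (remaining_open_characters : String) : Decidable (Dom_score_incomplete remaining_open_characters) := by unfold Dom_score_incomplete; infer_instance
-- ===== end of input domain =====

-- B replaces A's Horner running-multiply loop with two staged passes: translate each
-- character to its index-based digit value, then take the positional weighted sum
-- value * 5^i over the reversed digit list; same O(n) cost (objective: alternative).
-- Both Pythons raise InvalidCharacterError on any character that is not one of the
-- four opening brackets; Pre_ excludes exactly those inputs.

-- ===== PORT A =====
-- per-character value of A's match statement (the `case _` raise branch is excluded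
-- by Pre_; its value here, 0, is never reached inside Pre_)
def pvCharValue (c : Char) : Int :=
  if c = '(' then 1
  else if c = '[' then 2
  else if c = '{' then 3
  else if c = '<' then 4
  else 0

def score_incomplete (remaining_open_characters : String) : Int :=
  remaining_open_characters.toList.foldl
    (fun score character => score * 5 + pvCharValue character) 0

-- ===== PORT B =====
-- _OPENERS.index(character) + 1 (the not-in-_OPENERS raise branch is excluded by Pre_;
-- idxOf then returns 4 and the value 5 is never reached inside Pre_)
def pvValB (c : Char) : Int := ("([{<".toList.idxOf c : Int) + 1

def score_incomplete_alt (remaining_open_characters : String) : Int :=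
  let values := remaining_open_characters.toList.map pvValB
  ((values.reverse.zipIdx.map (fun p => p.1 * (5 : Int) ^ p.2)).sum)

-- ===== PRECONDITION & SPEC =====
-- Pre_ excludes exactly the inputs on which A raises InvalidCharacterError
-- (any character that is not one of the four opening brackets); B raises there too.
def Pre_score_incomplete (remaining_open_characters : String) : Prop :=
  (remaining_open_characters.toList.all
    fun c => c == '(' || c == '[' || c == '{' || c == '<') = true
instance (remaining_open_characters : String) : Decidable (Pre_score_incomplete remaining_open_characters) := by unfold Pre_score_incomplete; infer_instance
def pvWitness_score_incomplete : String := "(["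

def Spec_score_incomplete (remaining_open_characters : String) (out : Int) : Prop := out = score_incomplete_alt remaining_open_characters
instance (remaining_open_characters : String) (out : Int) : Decidable (Spec_score_incomplete remaining_open_characters out) := by unfold Spec_score_incomplete; infer_instance

-- ===== CLAIM (what is proved, stated in full; the proofs are below) =====
def Claim_equal_score_incomplete : Prop := ∀ (remaining_open_characters : String), Dom_score_incomplete remaining_open_characters → Pre_score_incomplete remaining_open_characters → Spec_score_incomplete remaining_open_characters (score_incomplete remaining_open_characters)

-- ===== LEMMAS AND PROOFS =====

-- little-endian base-5 value of a digit list (head has weight 1)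
def pvLEv : List Int → Int
  | [] => 0
  | v :: l => v + 5 * pvLEv l

theorem pvZipSum (m : List Int) (n : Nat) :
    ((m.zipIdx n).map (fun p => p.1 * (5 : Int) ^ p.2)).sum = 5 ^ n * pvLEv m := by
  induction m generalizing n with
  | nil => simp [pvLEv]
  | cons v m ih =>
    simp [List.zipIdx_cons, ih, pvLEv, pow_succ]
    ring

theorem pvA_fold (l : List Int) :
    l.foldl (fun score v => score * 5 + v) 0 = pvLEv l.reverse := by
  induction l using List.reverseRecOn with
  | nil => simp [pvLEv]
  | append_singleton l v ih =>
    simp [List.foldl_append, ih, pvLEv]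
    ring

theorem pvVal_eq (c : Char)
    (h : (c == '(' || c == '[' || c == '{' || c == '<') = true) :
    pvValB c = pvCharValue c := by
  simp only [Bool.or_eq_true, beq_iff_eq] at h
  rcases h with ((h | h) | h) | h <;> subst h <;> decide

-- ===== VERDICT (by name: the statement is the Claim_ definition above) =====
theorem score_incomplete_spec : Claim_equal_score_incomplete := by
  intro s _ hpre
  unfold Spec_score_incomplete score_incomplete score_incomplete_alt
  have hmap : s.toList.map pvValB = s.toList.map pvCharValue := by
    apply List.map_congr_left
    intro c hc
    exact pvVal_eq c (by
      have := List.all_eq_true.mp hpre c hc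
      simpa using this)
  simp only [hmap, pvZipSum, ← List.map_reverse]
  have hfold : s.toList.foldl (fun score character => score * 5 + pvCharValue character) 0
      = (s.toList.map pvCharValue).foldl (fun score v => score * 5 + v) 0 := by
    rw [List.foldl_map]
  rw [hfold, pvA_fold]
  simp
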